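-- pv_equiv track=rewrite | github.com/valira3/stock-spike-monitor | backtest/replay.py | _self_baseline
-- ===== SOURCE A (Python) =====
-- from typing import Iterable, Optional
--
-- def _self_baseline(volumes: list[int]) -> Optional[int]:
--     """Median of nonzero volumes for self-baselining when no profile is loaded."""
--     nz = sorted(v for v in volumes if v > 0)
--     if not nz:
--         return None
--     n = len(nz)
--     if n % 2 == 1:
--         return int(nz[n // 2])
--     return int((nz[n // 2 - 1] + nz[n // 2]) / 2)
-- ===== SOURCE B (Python) =====
-- from typing import Iterable, Optional
--
-- def _select(xs, k):
--     # iterative quickselect: k-th smallest (0-based) of xs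
--     while True:
--         p = xs[len(xs) // 2]
--         lt = [x for x in xs if x < p]
--         if k < len(lt):
--             xs = lt
--             continue
--         gt = [x for x in xs if x > p]
--         ne = len(xs) - len(gt)
--         if k < ne:
--             return p
--         xs = gt
--         k -= ne
--
-- def _self_baseline(volumes: list[int]) -> Optional[int]:
--     nz = [v for v in volumes if v > 0]
--     if not nz:
--         return None
--     n = len(nz)
--     if n % 2 == 1:
--         return _select(nz, n // 2)
--     return (_select(nz, n // 2 - 1) + _select(nz, n // 2)) // 2
-- ===== Notes on version B (the rewrite author's own statement) =====
-- stated objective: alternative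
-- what changed: Replaces full sorting of the positive volumes by an iterative three-way-partition quickselect that extracts only the middle order statistic(s), and computes the even-case mean with integer floor division instead of float division.
import Mathlib
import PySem

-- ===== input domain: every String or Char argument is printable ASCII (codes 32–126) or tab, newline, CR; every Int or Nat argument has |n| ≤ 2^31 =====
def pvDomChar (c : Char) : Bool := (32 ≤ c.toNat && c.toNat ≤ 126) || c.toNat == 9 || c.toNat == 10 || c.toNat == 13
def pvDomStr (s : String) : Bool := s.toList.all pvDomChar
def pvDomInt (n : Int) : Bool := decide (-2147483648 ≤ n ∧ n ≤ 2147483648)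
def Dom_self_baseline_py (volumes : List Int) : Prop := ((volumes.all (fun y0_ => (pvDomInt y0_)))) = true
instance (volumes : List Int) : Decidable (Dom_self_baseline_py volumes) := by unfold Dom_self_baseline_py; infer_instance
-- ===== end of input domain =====

-- B replaces the full sort of the positive volumes by a three-way-partition quickselect
-- that extracts only the middle order statistic(s); objective: alternative algorithm.

-- ===== PORT A =====
-- int((a+b)/2): a and b are positive list elements with |a+b| ≤ 2^32 < 2^53 on Dom, so the
-- float division is exact and int() truncates toward zero: exactly Int.tdiv (a + b) 2.
def self_baseline_py (volumes : List Int) : Option Int :=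
  let nz := PySem.List.sorted (volumes.filter (fun v => decide (0 < v))) (fun x => x) false
  if nz = [] then none
  else
    let n : Int := (nz.length : Int)
    if PySem.Int.mod n 2 = 1 then
      PySem.List.pyGet? nz (PySem.Int.floordiv n 2)
    else
      match PySem.List.pyGet? nz (PySem.Int.floordiv n 2 - 1), PySem.List.pyGet? nz (PySem.Int.floordiv n 2) with
      | some a, some b => some (Int.tdiv (a + b) 2)
      | _, _ => none

-- ===== PORT B =====
-- iterative quickselect from Source B (the while-True loop as the obvious recursion;
-- the fuel argument only makes the recursion structural: the loop shrinks the list,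
-- so xs.length steps always suffice)
def pvSelectGo : Nat → List Int → Nat → Int
  | 0, _, _ => 0
  | _ + 1, [], _ => 0   -- unreachable: callers pass nonempty lists
  | fuel + 1, x :: t, k =>
    let p := (x :: t)[(x :: t).length / 2]'(Nat.div_lt_self (by simp) (by omega))
    let lt := (x :: t).filter (fun y => decide (y < p))
    if k < lt.length then pvSelectGo fuel lt k
    else
      let gt := (x :: t).filter (fun y => decide (p < y))
      let ne := (x :: t).length - gt.length
      if k < ne then p
      else pvSelectGo fuel gt (k - ne)

def pvSelect (xs : List Int) (k : Nat) : Int := pvSelectGo xs.length xs k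

def self_baseline_py_alt (volumes : List Int) : Option Int :=
  let nz := volumes.filter (fun v => decide (0 < v))
  if nz = [] then none
  else
    let n := nz.length
    if n % 2 = 1 then some (pvSelect nz (n / 2))
    else some (PySem.Int.floordiv (pvSelect nz (n / 2 - 1) + pvSelect nz (n / 2)) 2)

-- ===== PRECONDITION & SPEC =====
def Spec_self_baseline_py (volumes : List Int) (out : Option Int) : Prop := out = self_baseline_py_alt volumes
instance (volumes : List Int) (out : Option Int) : Decidable (Spec_self_baseline_py volumes out) := by unfold Spec_self_baseline_py; infer_instance

-- ===== CLAIM (what is proved, stated in full; the proofs are below) =====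
def Claim_equal_self_baseline_py : Prop := ∀ (volumes : List Int), Dom_self_baseline_py volumes → Spec_self_baseline_py volumes (self_baseline_py volumes)

-- ===== LEMMAS AND PROOFS =====

-- a three-way partition class is strictly shorter than the list (the pivot is outside it)
theorem pv_filter_len_lt {p : Int → Bool} {l : List Int} {a : Int}
    (ha : a ∈ l) (hpa : p a = false) : (l.filter p).length < l.length := by
  have h : ∃ x ∈ l, p x = false := ⟨a, ha, hpa⟩
  simpa using h

theorem pv_tdiv_two (x : Int) (hx : 0 ≤ x) : Int.tdiv x 2 = x / 2 := by
  rcases Int.eq_ofNat_of_zero_le hx with ⟨n, rfl⟩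
  rfl

-- the three-way partition at a pivot is a permutation of the list
theorem pv_partition_perm (p : Int) (l : List Int) :
    (l.filter (fun y => decide (y < p)) ++
      (l.filter (fun y => decide (y = p)) ++ l.filter (fun y => decide (p < y)))).Perm l := by
  induction l with
  | nil => simp
  | cons x t ih =>
    rcases lt_trichotomy x p with h | h | h
    · have e1 : decide (x < p) = true := by simp [h]
      have e2 : decide (x = p) = false := by simp [ne_of_lt h]
      have e3 : decide (p < x) = false := by simp [asymm h]
      simp only [List.filter_cons, e1, e2, e3, if_true, if_false, Bool.false_eq_true,
        List.cons_append]
      exact ih.cons x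
    · have e1 : decide (x < p) = false := by simp [h]
      have e2 : decide (x = p) = true := by simp [h]
      have e3 : decide (p < x) = false := by simp [h]
      simp only [List.filter_cons, e1, e2, e3, if_true, if_false, Bool.false_eq_true]
      exact List.perm_middle.trans (ih.cons x)
    · have e1 : decide (x < p) = false := by simp [asymm h]
      have e2 : decide (x = p) = false := by simp [(ne_of_lt h).symm]
      have e3 : decide (p < x) = true := by simp [h]
      simp only [List.filter_cons, e1, e2, e3, if_true, if_false, Bool.false_eq_true]
      exact (List.Perm.append_left _ List.perm_middle).trans
        (List.perm_middle.trans (ih.cons x))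

-- quickselect computes the k-th element of the (Python-)sorted list
theorem pvSelectGo_eq_sorted : ∀ (fuel : Nat) (xs : List Int) (k : Nat), xs.length ≤ fuel →
    k < xs.length → pvSelectGo fuel xs k = (PySem.List.sorted xs (fun x => x) false).getD k 0 := by
  intro fuel
  induction fuel with
  | zero => intro xs k h1 h2; omega
  | succ fuel ih =>
    intro xs k hfuel hk
    match xs with
    | [] => simp at hk
    | x :: t =>
      simp only [pvSelectGo]
      have hplt : (x :: t).length / 2 < (x :: t).length := Nat.div_lt_self (by simp) (by omega)
      set p := (x :: t)[(x :: t).length / 2]'hplt with hp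
      have hpmem : p ∈ x :: t := List.getElem_mem _
      set lt := (x :: t).filter (fun y => decide (y < p)) with hlt
      set eqL := (x :: t).filter (fun y => decide (y = p)) with heq
      set gt := (x :: t).filter (fun y => decide (p < y)) with hgt
      have hperm : (lt ++ (eqL ++ gt)).Perm (x :: t) := pv_partition_perm p (x :: t)
      -- every element of eqL is p
      have heqall : ∀ y ∈ eqL, y = p := by
        intro y hy
        have := List.of_mem_filter hy
        simpa using this
      -- the sorted list is sorted lt ++ eqL ++ sorted gt
      set slt := PySem.List.sorted lt (fun x => x) false with hslt
      set sgt := PySem.List.sorted gt (fun x => x) false with hsgt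
      have hsltlen : slt.length = lt.length := PySem.List.length_sorted _ _ _
      have hsgtlen : sgt.length = gt.length := PySem.List.length_sorted _ _ _
      have hltmem : ∀ y ∈ slt, y < p := by
        intro y hy
        have := List.of_mem_filter ((PySem.List.mem_sorted _ _ _ _).mp hy)
        simpa using this
      have hgtmem : ∀ y ∈ sgt, p < y := by
        intro y hy
        have := List.of_mem_filter ((PySem.List.mem_sorted _ _ _ _).mp hy)
        simpa using this
      have hsorted : PySem.List.sorted (x :: t) (fun x => x) false = slt ++ (eqL ++ sgt) := by
        apply PySem.List.sorted_id_eq_of_perm_of_pairwise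
        · exact (List.Perm.append (PySem.List.sorted_perm _ _ _)
            (List.Perm.append_left eqL (PySem.List.sorted_perm _ _ _))).trans hperm
        · rw [List.pairwise_append]
          refine ⟨by simpa using PySem.List.sorted_pairwise lt (fun x => x), ?_, ?_⟩
          · rw [List.pairwise_append]
            refine ⟨?_, by simpa using PySem.List.sorted_pairwise gt (fun x => x), ?_⟩
            · exact List.pairwise_of_forall_mem_list (fun a ha b hb => by
                rw [heqall a ha, heqall b hb])
            · intro a ha b hb
              exact le_of_lt (lt_of_le_of_lt (le_of_eq (heqall a ha)) (hgtmem b hb))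
          · intro a ha b hb
            rcases List.mem_append.mp hb with h | h
            · exact le_of_lt (lt_of_lt_of_le (hltmem a ha) (le_of_eq (heqall b h).symm))
            · exact le_of_lt (lt_trans (hltmem a ha) (hgtmem b h))
      -- lengths
      have hlen3 : lt.length + (eqL.length + gt.length) = (x :: t).length := by
        simpa using hperm.length_eq
      have hgtle : gt.length ≤ (x :: t).length := List.length_filter_le _ _
      rw [hsorted]
      by_cases h1 : k < lt.length
      · rw [if_pos h1]
        have hlt_lt : lt.length < (x :: t).length := pv_filter_len_lt hpmem (by simp)
        rw [ih lt k (by omega) h1, ← hslt]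
        rw [List.getD_append _ _ _ _ (by omega)]
      · rw [if_neg h1]
        by_cases h2 : k < (x :: t).length - gt.length
        · rw [if_pos h2]
          have hk2 : k - lt.length < eqL.length := by omega
          rw [List.getD_append_right _ _ _ _ (by omega), hsltlen,
              List.getD_append _ _ _ _ hk2,
              List.getD_eq_getElem _ _ hk2]
          exact (heqall _ (List.getElem_mem _)).symm
        · rw [if_neg h2]
          have hgt_lt : gt.length < (x :: t).length := pv_filter_len_lt hpmem (by simp)
          have hkgt : k - ((x :: t).length - gt.length) < gt.length := by omega
          rw [ih gt _ (by omega) hkgt, ← hsgt]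
          rw [List.getD_append_right _ _ _ _ (by omega),
              List.getD_append_right _ _ _ _ (by rw [hsltlen]; omega)]
          congr 1
          rw [hsltlen]
          omega

theorem pvSelect_eq_sorted (xs : List Int) (k : Nat) (hk : k < xs.length) :
    pvSelect xs k = (PySem.List.sorted xs (fun x => x) false).getD k 0 :=
  pvSelectGo_eq_sorted xs.length xs k le_rfl hk

-- elements of the sorted filtered list are positive
theorem pv_sorted_pos (volumes : List Int) (y : Int)
    (hy : y ∈ PySem.List.sorted (volumes.filter (fun v => decide (0 < v))) (fun x => x) false) :
    0 < y := by
  have := List.of_mem_filter ((PySem.List.mem_sorted _ _ _ _).mp hy)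
  simpa using this

-- ===== VERDICT (by name: the statement is the Claim_ definition above) =====
theorem self_baseline_py_spec : Claim_equal_self_baseline_py := by
  intro volumes _
  unfold Spec_self_baseline_py self_baseline_py self_baseline_py_alt
  simp only []
  set nz := volumes.filter (fun v => decide (0 < v)) with hnz
  set s := PySem.List.sorted nz (fun x => x) false with hs
  by_cases h0 : nz = []
  · rw [if_pos h0, if_pos (by rw [hs, h0]; simp [PySem.List.sorted_eq_nil_iff])]
  · have hs0 : s ≠ [] := by
      rw [hs]; simpa [PySem.List.sorted_eq_nil_iff] using h0
    rw [if_neg h0, if_neg hs0]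
    have hlen : s.length = nz.length := PySem.List.length_sorted _ _ _
    have hpos : 0 < nz.length := List.length_pos_of_ne_nil h0
    have hsel : ∀ k : Nat, k < nz.length → pvSelect nz k = s.getD k 0 := by
      intro k hk
      rw [hs]
      exact pvSelect_eq_sorted nz k hk
    rw [hlen]
    have hmod : PySem.Int.mod ((nz.length : Int)) 2 = ((nz.length % 2 : Nat) : Int) := by
      exact_mod_cast PySem.Int.mod_natCast nz.length 2
    have hdiv : PySem.Int.floordiv ((nz.length : Int)) 2 = ((nz.length / 2 : Nat) : Int) := by
      exact_mod_cast PySem.Int.floordiv_natCast nz.length 2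
    by_cases hodd : nz.length % 2 = 1
    · rw [if_pos (by rw [hmod, hodd]; rfl), if_pos hodd]
      rw [hdiv, PySem.List.pyGet?_natCast]
      have hin : nz.length / 2 < s.length := by omega
      rw [List.getElem?_eq_getElem hin, hsel _ (by omega),
          List.getD_eq_getElem _ _ hin]
    · have hmodne : ((nz.length % 2 : Nat) : Int) ≠ 1 := by
        intro hc
        exact hodd (by exact_mod_cast hc)
      rw [if_neg (by rw [hmod]; exact hmodne), if_neg hodd]
      have h2 : 2 ≤ nz.length := by omega
      have hhalf : 1 ≤ nz.length / 2 := by omega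
      have hidx1 : nz.length / 2 - 1 < s.length := by omega
      have hidx2 : nz.length / 2 < s.length := by omega
      have hcast : PySem.Int.floordiv ((nz.length : Int)) 2 - 1 = ((nz.length / 2 - 1 : Nat) : Int) := by
        rw [hdiv]
        push_cast [hhalf]
        ring
      rw [hcast, hdiv, PySem.List.pyGet?_natCast, PySem.List.pyGet?_natCast]
      rw [List.getElem?_eq_getElem hidx1, List.getElem?_eq_getElem hidx2]
      simp only []
      rw [hsel _ (by omega), hsel _ (by omega),
          List.getD_eq_getElem _ _ hidx1, List.getD_eq_getElem _ _ hidx2]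
      congr 1
      have ha : 0 < s[nz.length / 2 - 1]'hidx1 :=
        pv_sorted_pos volumes _ (by rw [← hnz, ← hs]; exact List.getElem_mem _)
      have hb : 0 < s[nz.length / 2]'hidx2 :=
        pv_sorted_pos volumes _ (by rw [← hnz, ← hs]; exact List.getElem_mem _)
      rw [PySem.Int.floordiv_eq_ediv_of_pos (by omega), pv_tdiv_two _ (by omega)]
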